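-- pv_equiv track=rewrite | github.com/zeriouslyzen/icebrg | src/iceburg/security/runtime_governance.py | _get_permissions_from_groups
-- ===== SOURCE A (Python) =====
-- from typing import Dict, List, Any, Optional, Tuple, Set
--
-- def _get_permissions_from_groups(groups: List[str]) -> Set[str]:
--     """Get permissions from user groups."""
--     permissions = set()
--
--     group_permissions = {
--         "researchers": ["research", "chat"],
--         "developers": ["research", "chat", "software"],
--         "admins": ["research", "chat", "software", "civilization", "admin"],
--         "system": ["research", "chat", "software", "civilization", "admin", "system"]
--     }
--
--     for group in groups:
--         if group in group_permissions:
--             permissions.update(group_permissions[group])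
--
--     return permissions
-- ===== SOURCE B (Python) =====
-- def _get_permissions_from_groups(groups):
--     """Get permissions from user groups."""
--     rank_of = {"researchers": 1, "developers": 2, "admins": 3, "system": 4}
--     cumulative = [
--         [],
--         ["research", "chat"],
--         ["research", "chat", "software"],
--         ["research", "chat", "software", "civilization", "admin"],
--         ["research", "chat", "software", "civilization", "admin", "system"],
--     ]
--     rank = 0
--     for g in groups:
--         r = rank_of.get(g, 0)
--         if r > rank:
--             rank = r
--     return set(cumulative[rank])
-- ===== Notes on version B (the rewrite author's own statement) =====
-- stated objective: alternative
-- what changed: Exploits that the four permission lists are strictly nested: instead of accumulating set unions per group, B computes the maximum rank of any recognized group in one scan and returns the cumulative permission set at that rank.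
import Mathlib
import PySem

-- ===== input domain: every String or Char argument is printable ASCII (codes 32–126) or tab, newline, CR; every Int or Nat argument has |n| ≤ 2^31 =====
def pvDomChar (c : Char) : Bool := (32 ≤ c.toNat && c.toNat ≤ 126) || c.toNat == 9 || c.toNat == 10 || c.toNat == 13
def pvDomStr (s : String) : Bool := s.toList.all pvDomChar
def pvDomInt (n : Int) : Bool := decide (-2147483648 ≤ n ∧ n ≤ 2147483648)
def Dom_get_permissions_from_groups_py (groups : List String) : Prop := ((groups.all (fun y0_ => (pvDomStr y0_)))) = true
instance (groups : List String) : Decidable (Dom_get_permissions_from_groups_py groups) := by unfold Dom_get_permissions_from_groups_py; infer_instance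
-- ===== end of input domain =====

-- B replaces A's per-group set-union accumulation by a single max-rank scan over the
-- nested permission hierarchy followed by one table lookup (objective: alternative).


-- ===== PORT A =====
-- the literal dict of A
def pvGroupPerms : PySem.Dict String (List String) :=
  PySem.Dict.ofList
    [ ("researchers", ["research", "chat"])
    , ("developers",  ["research", "chat", "software"])
    , ("admins",      ["research", "chat", "software", "civilization", "admin"])
    , ("system",      ["research", "chat", "software", "civilization", "admin", "system"]) ]

def get_permissions_from_groups_py (groups : List String) : List String :=
  groups.foldl
    (fun permissions group =>
      match pvGroupPerms.get? group with
      | some ps => PySem.Set.update permissions ps   -- 'if group in dict: permissions.update(dict[group])'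
      | none => permissions)
    PySem.Set.empty

-- ===== PORT B =====
def pvRankOf : PySem.Dict String Nat :=
  PySem.Dict.ofList [("researchers", 1), ("developers", 2), ("admins", 3), ("system", 4)]

def pvCumulative : List (List String) :=
  [ []
  , ["research", "chat"]
  , ["research", "chat", "software"]
  , ["research", "chat", "software", "civilization", "admin"]
  , ["research", "chat", "software", "civilization", "admin", "system"] ]

def get_permissions_from_groups_py_alt (groups : List String) : List String :=
  let rank := groups.foldl
    (fun rank g =>
      let r := pvRankOf.getD g 0
      if r > rank then r else rank)
    0
  PySem.Set.ofList (pvCumulative.getD rank [])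

-- ===== PRECONDITION & SPEC =====
def Spec_get_permissions_from_groups_py (groups : List String) (out : List String) : Prop := out = get_permissions_from_groups_py_alt groups
instance (groups : List String) (out : List String) : Decidable (Spec_get_permissions_from_groups_py groups out) := by unfold Spec_get_permissions_from_groups_py; infer_instance

-- ===== CLAIM (what is proved, stated in full; the proofs are below) =====
def Claim_equal_get_permissions_from_groups_py : Prop := ∀ (groups : List String), Dom_get_permissions_from_groups_py groups → Spec_get_permissions_from_groups_py groups (get_permissions_from_groups_py groups)

-- ===== LEMMAS AND PROOFS =====

-- the cumulative permission set at a given rank, in A's insertion order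
def pvCum (r : Nat) : List String := pvCumulative.getD r []

-- the two literal dicts, as plain association lists
theorem pvGP_eq : pvGroupPerms = PySem.Dict.mk
    [ ("researchers", ["research", "chat"])
    , ("developers",  ["research", "chat", "software"])
    , ("admins",      ["research", "chat", "software", "civilization", "admin"])
    , ("system",      ["research", "chat", "software", "civilization", "admin", "system"]) ] := by
  decide

theorem pvRK_eq : pvRankOf = PySem.Dict.mk
    [("researchers", 1), ("developers", 2), ("admins", 3), ("system", 4)] := by
  decide

-- an unrecognized group neither unlocks permissions nor has a rank
theorem pvGet_none (g : String) (h1 : ¬ g = "researchers") (h2 : ¬ g = "developers")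
    (h3 : ¬ g = "admins") (h4 : ¬ g = "system") : pvGroupPerms.get? g = none := by
  rw [pvGP_eq]
  simp [PySem.Dict.get?, Ne.symm h1, Ne.symm h2, Ne.symm h3, Ne.symm h4]

theorem pvRank_none (g : String) (h1 : ¬ g = "researchers") (h2 : ¬ g = "developers")
    (h3 : ¬ g = "admins") (h4 : ¬ g = "system") : pvRankOf.getD g 0 = 0 := by
  rw [pvRK_eq]
  simp [PySem.Dict.getD, PySem.Dict.get?, Ne.symm h1, Ne.symm h2, Ne.symm h3, Ne.symm h4]

theorem pvRank_le (g : String) : pvRankOf.getD g 0 ≤ 4 := by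
  by_cases h1 : g = "researchers"
  · subst h1; decide
  by_cases h2 : g = "developers"
  · subst h2; decide
  by_cases h3 : g = "admins"
  · subst h3; decide
  by_cases h4 : g = "system"
  · subst h4; decide
  rw [pvRank_none g h1 h2 h3 h4]
  decide

-- the rank accumulator stays ≤ 4
theorem pvStep_le (r : Nat) (hr : r ≤ 4) (g : String) :
    (if pvRankOf.getD g 0 > r then pvRankOf.getD g 0 else r) ≤ 4 := by
  have := pvRank_le g
  split <;> omega

-- one step of A's loop on a cumulative state is a rank-max step
theorem pvStep (r : Nat) (hr : r ≤ 4) (g : String) :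
    (match pvGroupPerms.get? g with
      | some ps => PySem.Set.update (pvCum r) ps
      | none => pvCum r)
    = pvCum (if pvRankOf.getD g 0 > r then pvRankOf.getD g 0 else r) := by
  by_cases h1 : g = "researchers"
  · subst h1; interval_cases r <;> decide
  by_cases h2 : g = "developers"
  · subst h2; interval_cases r <;> decide
  by_cases h3 : g = "admins"
  · subst h3; interval_cases r <;> decide
  by_cases h4 : g = "system"
  · subst h4; interval_cases r <;> decide
  rw [pvGet_none g h1 h2 h3 h4, pvRank_none g h1 h2 h3 h4]
  simp

-- Set.ofList is the identity on the (duplicate-free) cumulative lists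
theorem pvCum_ofList (r : Nat) (hr : r ≤ 4) :
    PySem.Set.ofList (pvCum r) = pvCum r := by
  interval_cases r <;> decide

-- loop invariant: A's accumulated set is the cumulative set of B's running max rank
theorem pvInvariant (groups : List String) :
    ∀ (r : Nat), r ≤ 4 →
      groups.foldl
        (fun permissions group =>
          match pvGroupPerms.get? group with
          | some ps => PySem.Set.update permissions ps
          | none => permissions)
        (pvCum r)
      = pvCum (groups.foldl
          (fun rank g => if pvRankOf.getD g 0 > rank then pvRankOf.getD g 0 else rank) r) := by
  induction groups with
  | nil => intro r _; rfl
  | cons g t ih =>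
      intro r hr
      simp only [List.foldl_cons]
      rw [pvStep r hr g]
      exact ih _ (pvStep_le r hr g)

-- ===== VERDICT (by name: the statement is the Claim_ definition above) =====
theorem get_permissions_from_groups_py_spec : Claim_equal_get_permissions_from_groups_py := by
  intro groups hdom
  show get_permissions_from_groups_py groups = get_permissions_from_groups_py_alt groups
  clear hdom
  have hle : groups.foldl
      (fun rank g => if pvRankOf.getD g 0 > rank then pvRankOf.getD g 0 else rank) 0 ≤ 4 := by
    induction groups using List.reverseRecOn with
    | nil => decide
    | append_singleton t g ih => simpa [List.foldl_append] using pvStep_le _ ih g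
  unfold get_permissions_from_groups_py get_permissions_from_groups_py_alt
  rw [show (PySem.Set.empty : List String) = pvCum 0 from rfl,
      pvInvariant groups 0 (by decide), ← pvCum_ofList _ hle]
  rfl
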